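-- pv_equiv track=rewrite | github.com/a08160/Coding_Test_Practice | Practice_0411.py | solution
-- ===== SOURCE A (Python) =====
-- from collections import defaultdict
--
-- def solution(id_list, reports, k):
--     reports = set(reports)  # 중복 제거
--
--     # 신고당한 사람 기준으로 신고자 목록 저장
--     reported_by = defaultdict(set)
--     for report in reports:
--         reporter, reported = report.split()
--         reported_by[reported].add(reporter)
--
--     # 정지된 유저
--     banned = {user for user, reporters in reported_by.items() if len(reporters) >= k}
--
--     # 각 유저가 받은 메일 수 계산
--     mail_count = {user: 0 for user in id_list}
--     for reported_user in banned:
--         for reporter in reported_by[reported_user]: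
--             mail_count[reporter] += 1
--
--     # id_list 순서대로 결과 정리
--     return [mail_count[user] for user in id_list]
-- ===== SOURCE B (Python) =====
-- def solution(id_list, reports, k):
--     pairs = {tuple(r.split()) for r in reports}
--
--     def is_banned(v):
--         return sum(1 for q in pairs if q[1] == v) >= k
--
--     return [sum(1 for p in pairs if p[0] == u and is_banned(p[1])) for u in id_list]
-- ===== Notes on version B (the rewrite author's own statement) =====
-- stated objective: simpler
-- what changed: B drops A's dicts entirely: instead of grouping reporters per reported user, deriving a banned set and tallying a mail_count dict, it computes each user's answer directly by scanning the deduped report pairs, with 'banned' a predicate that counts distinct reports received on the fly.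
import Mathlib
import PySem

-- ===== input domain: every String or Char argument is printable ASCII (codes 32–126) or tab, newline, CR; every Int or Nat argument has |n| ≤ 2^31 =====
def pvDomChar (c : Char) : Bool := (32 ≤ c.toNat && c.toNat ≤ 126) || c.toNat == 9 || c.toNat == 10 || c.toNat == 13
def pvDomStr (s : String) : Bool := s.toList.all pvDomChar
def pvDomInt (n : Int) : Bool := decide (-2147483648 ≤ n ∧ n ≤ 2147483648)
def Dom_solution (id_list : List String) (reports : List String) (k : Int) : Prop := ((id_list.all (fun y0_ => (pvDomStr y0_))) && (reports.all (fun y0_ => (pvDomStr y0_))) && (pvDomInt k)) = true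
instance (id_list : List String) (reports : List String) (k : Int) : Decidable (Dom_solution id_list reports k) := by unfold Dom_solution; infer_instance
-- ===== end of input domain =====

-- B drops A's dicts entirely: no reporter-grouping, no banned set, no mail_count map —
-- each user's answer is computed directly by scanning the deduped report pairs (objective: simpler).

-- ===== PORT A =====
def solution (id_list : List String) (reports : List String) (k : Int) : List Int :=
  let reports' : PySem.Set String := PySem.Set.ofList reports   -- reports = set(reports)
  let reported_by : PySem.Dict String (PySem.Set String) :=
    reports'.foldl (fun d report =>
      match PySem.Str.split₀ report with                        -- reporter, reported = report.split()
      | [reporter, reported] => d.modify reported [] (fun s => PySem.Set.add s reporter)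
      | _ => d       -- Python raises ValueError here (unpacking); Pre_solution excludes such reports
      ) PySem.Dict.empty
  let banned : PySem.Set String :=
    PySem.Set.ofList ((reported_by.items.filter (fun p => k ≤ PySem.Set.len p.2)).map (fun p => p.1))
  let mail0 : PySem.Dict String Int :=
    id_list.foldl (fun d u => d.insert u 0) PySem.Dict.empty    -- {user: 0 for user in id_list}
  let mail : PySem.Dict String Int :=
    banned.foldl (fun d b =>
      (reported_by.getD b []).foldl (fun d r => d.modify r 0 (· + 1)) d) mail0
      -- mail_count[reporter] += 1: Python raises KeyError when reporter ∉ id_list; Pre_solution excludes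
  id_list.map (fun u => mail.getD u 0)

-- ===== PORT B =====
def solution_alt (id_list : List String) (reports : List String) (k : Int) : List Int :=
  let pairs : PySem.Set (List String) :=
    PySem.Set.ofList (reports.map (fun r => PySem.Str.split₀ r))   -- {tuple(r.split()) for r in reports}
  let is_banned : String → Bool := fun v =>                        -- sum(1 for q in pairs if q[1]==v) >= k
    k ≤ ((pairs.filter (fun q => PySem.List.pyGetD q 1 "" == v)).length : Int)
  id_list.map (fun u =>                                            -- sum(1 for p in pairs if p[0]==u and is_banned(p[1]))
    ((pairs.filter (fun p =>
      PySem.List.pyGetD p 0 "" == u && is_banned (PySem.List.pyGetD p 1 ""))).length : Int))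
  -- p[0]/p[1] would raise IndexError on a report with fewer than two tokens; Pre_solution excludes

-- ===== PRECONDITION & SPEC =====
-- helpers for Pre_solution only (not used by either port)
def pvPairs (reports : List String) : List (List String) :=
  PySem.Set.ofList (reports.map (fun r => PySem.Str.split₀ r))
def pvNumReporters (reports : List String) (v : String) : Int :=
  (((pvPairs reports).filter (fun q => PySem.List.pyGetD q 1 "" == v)).length : Int)

-- Pre_solution is exactly where Python A returns normally: every report splits into exactly two
-- tokens (otherwise unpacking raises ValueError), and every reporter of a banned user (one with
-- ≥ k distinct reporters) occurs in id_list (otherwise mail_count[reporter] raises KeyError).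
def Pre_solution (id_list : List String) (reports : List String) (k : Int) : Prop :=
  (∀ r ∈ reports, (PySem.Str.split₀ r).length = 2) ∧
  (∀ p ∈ pvPairs reports,
    k ≤ pvNumReporters reports (PySem.List.pyGetD p 1 "") → PySem.List.pyGetD p 0 "" ∈ id_list)
instance (id_list : List String) (reports : List String) (k : Int) : Decidable (Pre_solution id_list reports k) := by
  unfold Pre_solution; infer_instance

def pvWitness_solution : List String × List String × Int := (["muzi", "frodo"], ["muzi frodo", "frodo muzi"], 1)

def Spec_solution (id_list : List String) (reports : List String) (k : Int) (out : List Int) : Prop := out = solution_alt id_list reports k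
instance (id_list : List String) (reports : List String) (k : Int) (out : List Int) : Decidable (Spec_solution id_list reports k out) := by unfold Spec_solution; infer_instance

-- ===== CLAIM (what is proved, stated in full; the proofs are below) =====
def Claim_equal_solution : Prop := ∀ (id_list : List String) (reports : List String) (k : Int), Dom_solution id_list reports k → Pre_solution id_list reports k → Spec_solution id_list reports k (solution id_list reports k)

-- ===== LEMMAS AND PROOFS =====

-- proof-side names for the two components of a pair
def pfst (p : List String) : String := PySem.List.pyGetD p 0 ""
def psnd (p : List String) : String := PySem.List.pyGetD p 1 ""

lemma pfst_pair (a b : String) : pfst [a, b] = a := by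
  simp [pfst, PySem.List.pyGetD, PySem.List.pyGet?, PySem.List.pyIdx?]

lemma psnd_pair (a b : String) : psnd [a, b] = b := by
  simp [psnd, PySem.List.pyGetD, PySem.List.pyGet?, PySem.List.pyIdx?]

-- proof-side names for A's intermediate values
def pvStepA (d : PySem.Dict String (PySem.Set String)) (report : String) : PySem.Dict String (PySem.Set String) :=
  match PySem.Str.split₀ report with
  | [reporter, reported] => d.modify reported [] (fun s => PySem.Set.add s reporter)
  | _ => d

def pvRB (reports : List String) : PySem.Dict String (PySem.Set String) :=
  (PySem.Set.ofList reports).foldl pvStepA PySem.Dict.empty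

def pvBannedA (reports : List String) (k : Int) : PySem.Set String :=
  PySem.Set.ofList (((pvRB reports).items.filter (fun p => k ≤ PySem.Set.len p.2)).map (fun p => p.1))

def pvMail0 (id_list : List String) : PySem.Dict String Int :=
  id_list.foldl (fun d u => d.insert u 0) PySem.Dict.empty

lemma solution_eq (id_list reports : List String) (k : Int) :
    solution id_list reports k =
      id_list.map (fun u =>
        ((pvBannedA reports k).foldl (fun d b =>
          ((pvRB reports).getD b []).foldl (fun d r => d.modify r 0 (· + 1)) d) (pvMail0 id_list)).getD u 0) := by
  rfl

lemma solution_alt_eq (id_list reports : List String) (k : Int) :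
    solution_alt id_list reports k =
      id_list.map (fun u =>
        (((pvPairs reports).filter (fun p =>
          pfst p == u && decide (k ≤ pvNumReporters reports (psnd p)))).length : Int)) := by
  rfl

-- membership in A's grouping dict
lemma mem_getD_pvStepA (d : PySem.Dict String (PySem.Set String)) (r : String) (x v : String) :
    x ∈ (pvStepA d r).getD v [] ↔
      x ∈ d.getD v [] ∨ PySem.Str.split₀ r = [x, v] := by
  unfold pvStepA
  rcases h : PySem.Str.split₀ r with _ | ⟨s1, _ | ⟨s2, _ | ⟨s3, t⟩⟩⟩ <;>
    simp [PySem.Dict.getD_modify]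
  by_cases hv : v = s2
  · subst hv
    simp [PySem.Set.mem_add, eq_comm]
    try tauto
  · simp [hv, eq_comm]
    try tauto

lemma nodup_getD_pvStepA (d : PySem.Dict String (PySem.Set String)) (r : String)
    (hd : ∀ w, (d.getD w []).Nodup) : ∀ w, ((pvStepA d r).getD w []).Nodup := by
  intro w
  unfold pvStepA
  rcases h : PySem.Str.split₀ r with _ | ⟨s1, _ | ⟨s2, _ | ⟨s3, t⟩⟩⟩ <;>
    simp [PySem.Dict.getD_modify] <;> try exact hd w
  by_cases hv : w = s2
  · simp [hv]; exact PySem.Set.nodup_add _ _ (hd s2)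
  · simp [hv]; exact hd w

lemma nodup_keys_pvStepA (d : PySem.Dict String (PySem.Set String)) (r : String)
    (hd : d.keys.Nodup) : (pvStepA d r).keys.Nodup := by
  unfold pvStepA
  rcases h : PySem.Str.split₀ r with _ | ⟨s1, _ | ⟨s2, _ | ⟨s3, t⟩⟩⟩ <;>
    simp [PySem.Dict.keys_modify] <;> try exact hd
  exact PySem.Dict.nodup_keys_insert _ _ _ hd

lemma mem_keys_pvStepA (d : PySem.Dict String (PySem.Set String)) (r : String) (v : String) :
    v ∈ (pvStepA d r).keys ↔ v ∈ d.keys ∨ ∃ a, PySem.Str.split₀ r = [a, v] := by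
  unfold pvStepA
  rcases h : PySem.Str.split₀ r with _ | ⟨s1, _ | ⟨s2, _ | ⟨s3, t⟩⟩⟩ <;>
    simp [PySem.Dict.keys_modify, PySem.Dict.mem_keys_insert]
  simp [eq_comm]
  tauto

lemma getD_foldA (l : List String) (d : PySem.Dict String (PySem.Set String)) (a v : String) :
    a ∈ (l.foldl pvStepA d).getD v [] ↔
      a ∈ d.getD v [] ∨ ∃ r ∈ l, PySem.Str.split₀ r = [a, v] := by
  induction l generalizing d with
  | nil => simp
  | cons r rs ih =>
    rw [List.foldl_cons, ih, mem_getD_pvStepA]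
    simp only [List.mem_cons]
    constructor
    · rintro ((h1 | h1) | ⟨r', hr', h2⟩)
      · exact Or.inl h1
      · exact Or.inr ⟨r, Or.inl rfl, h1⟩
      · exact Or.inr ⟨r', Or.inr hr', h2⟩
    · rintro (h1 | ⟨r', rfl | hr2, h2⟩)
      · exact Or.inl (Or.inl h1)
      · exact Or.inl (Or.inr h2)
      · exact Or.inr ⟨r', hr2, h2⟩

lemma nodup_getD_foldA (l : List String) (d : PySem.Dict String (PySem.Set String))
    (hd : ∀ w, (d.getD w []).Nodup) : ∀ w, ((l.foldl pvStepA d).getD w []).Nodup := by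
  induction l generalizing d with
  | nil => simpa using hd
  | cons r rs ih =>
    rw [List.foldl_cons]; exact ih _ (nodup_getD_pvStepA d r hd)

lemma nodup_keys_foldA (l : List String) (d : PySem.Dict String (PySem.Set String))
    (hd : d.keys.Nodup) : (l.foldl pvStepA d).keys.Nodup := by
  induction l generalizing d with
  | nil => simpa using hd
  | cons r rs ih =>
    rw [List.foldl_cons]; exact ih _ (nodup_keys_pvStepA d r hd)

lemma mem_keys_foldA (l : List String) (d : PySem.Dict String (PySem.Set String)) (v : String) :
    v ∈ (l.foldl pvStepA d).keys ↔ v ∈ d.keys ∨ ∃ r ∈ l, ∃ a, PySem.Str.split₀ r = [a, v] := by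
  induction l generalizing d with
  | nil => simp
  | cons r rs ih =>
    rw [List.foldl_cons, ih, mem_keys_pvStepA]
    simp only [List.mem_cons]
    constructor
    · rintro ((h1 | h1) | ⟨r', hr', h2⟩)
      · exact Or.inl h1
      · exact Or.inr ⟨r, Or.inl rfl, h1⟩
      · exact Or.inr ⟨r', Or.inr hr', h2⟩
    · rintro (h1 | ⟨r', rfl | hr2, h2⟩)
      · exact Or.inl (Or.inl h1)
      · exact Or.inl (Or.inr h2)
      · exact Or.inr ⟨r', hr2, h2⟩

lemma mem_pvPairs (reports : List String) (p : List String) :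
    p ∈ pvPairs reports ↔ ∃ r ∈ reports, PySem.Str.split₀ r = p := by
  simp [pvPairs, PySem.Set.mem_ofList]

lemma shape_pvPairs (reports : List String)
    (wf : ∀ r ∈ reports, (PySem.Str.split₀ r).length = 2) :
    ∀ p ∈ pvPairs reports, p = [pfst p, psnd p] := by
  intro p hp
  rcases (mem_pvPairs reports p).mp hp with ⟨r, hr, rfl⟩
  have h2 := wf r hr
  rcases hl : PySem.Str.split₀ r with _ | ⟨a, _ | ⟨b, _ | ⟨c, t⟩⟩⟩ <;> simp [hl] at h2 ⊢
  rw [pfst_pair, psnd_pair]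
  exact ⟨rfl, rfl⟩

lemma mem_getD_pvRB (reports : List String) (a v : String) :
    a ∈ (pvRB reports).getD v [] ↔ [a, v] ∈ pvPairs reports := by
  unfold pvRB
  rw [getD_foldA, mem_pvPairs]
  simp [PySem.Set.mem_ofList]

-- the distinct-reporter count of v agrees with B's on-the-fly count
lemma card_reporters (reports : List String)
    (wf : ∀ r ∈ reports, (PySem.Str.split₀ r).length = 2) (v : String) :
    (((pvRB reports).getD v []).length : Int) = pvNumReporters reports v := by
  have hnd1 : ((pvRB reports).getD v []).Nodup := by
    apply nodup_getD_foldA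
    intro w; simp [PySem.Dict.getD_empty]
  have hndP : (pvPairs reports).Nodup := PySem.Set.nodup_ofList _
  have hnd2 : (((pvPairs reports).filter (fun p => psnd p == v)).map pfst).Nodup := by
    apply List.Nodup.map_on _ (hndP.filter _)
    intro x hx y hy hxy
    have hx' := List.mem_filter.mp hx
    have hy' := List.mem_filter.mp hy
    have hvx : psnd x = v := by simpa using hx'.2
    have hvy : psnd y = v := by simpa using hy'.2
    rw [shape_pvPairs reports wf x hx'.1, shape_pvPairs reports wf y hy'.1, hxy, hvx, hvy]
  have hmem : ∀ a, a ∈ (pvRB reports).getD v [] ↔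
      a ∈ ((pvPairs reports).filter (fun p => psnd p == v)).map pfst := by
    intro a
    rw [mem_getD_pvRB]
    constructor
    · intro h
      exact List.mem_map.mpr ⟨[a, v], List.mem_filter.mpr ⟨h, by simp [psnd_pair]⟩, pfst_pair a v⟩
    · intro h
      rcases List.mem_map.mp h with ⟨p, hp, rfl⟩
      have hp' := List.mem_filter.mp hp
      have hvp : psnd p = v := by simpa using hp'.2
      have hs := shape_pvPairs reports wf p hp'.1
      rw [← hvp, ← hs]
      exact hp'.1
  have hperm := (List.perm_ext_iff_of_nodup hnd1 hnd2).mpr hmem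
  rw [hperm.length_eq, List.length_map]
  simp [pvNumReporters, psnd]

-- membership in A's banned set, characterised without A's dict
lemma mem_bannedA_iff (reports : List String) (k : Int)
    (wf : ∀ r ∈ reports, (PySem.Str.split₀ r).length = 2) (b : String) :
    b ∈ pvBannedA reports k ↔
      (∃ p ∈ pvPairs reports, psnd p = b) ∧ k ≤ pvNumReporters reports b := by
  have hndK : (pvRB reports).keys.Nodup := nodup_keys_foldA _ _ PySem.Dict.nodup_keys_empty
  have hA : b ∈ pvBannedA reports k ↔
      b ∈ (pvRB reports).keys ∧ k ≤ (((pvRB reports).getD b []).length : Int) := by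
    unfold pvBannedA
    rw [PySem.Set.mem_ofList]
    simp only [List.mem_map, List.mem_filter]
    constructor
    · rintro ⟨⟨kk, sset⟩, ⟨hitems, hk⟩, rfl⟩
      refine ⟨PySem.Dict.mem_keys_of_mem_items _ hitems, ?_⟩
      have hgd := PySem.Dict.getD_of_mem_items _ hitems hndK []
      rw [hgd]
      simpa [PySem.Set.len] using hk
    · rintro ⟨hkeys, hk⟩
      have hsome : ∃ sset, (pvRB reports).get? b = some sset := by
        cases h : (pvRB reports).get? b with
        | none => exact absurd (((pvRB reports).get?_eq_none_iff_not_mem_keys b).mp h) (by simpa using hkeys)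
        | some sset => exact ⟨sset, rfl⟩
      rcases hsome with ⟨sset, hs⟩
      refine ⟨(b, sset), ⟨PySem.Dict.mem_items_of_get?_eq_some _ hs, ?_⟩, rfl⟩
      have hgd := PySem.Dict.getD_of_get?_eq_some _ [] hs
      rw [hgd] at hk
      simpa [PySem.Set.len] using hk
  have hkeys : b ∈ (pvRB reports).keys ↔ ∃ p ∈ pvPairs reports, psnd p = b := by
    unfold pvRB
    rw [mem_keys_foldA]
    simp only [PySem.Dict.keys_empty, List.not_mem_nil, false_or, PySem.Set.mem_ofList]
    constructor
    · rintro ⟨r, hr, a, hl⟩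
      exact ⟨[a, b], (mem_pvPairs reports _).mpr ⟨r, hr, hl⟩, psnd_pair a b⟩
    · rintro ⟨p, hp, rfl⟩
      rcases (mem_pvPairs reports p).mp hp with ⟨r, hr, hl⟩
      exact ⟨r, hr, pfst p, by rw [hl]; exact shape_pvPairs reports wf p hp⟩
  rw [hA, hkeys, card_reporters reports wf b]

lemma getD_pvMail0 (id_list : List String) (u : String) : (pvMail0 id_list).getD u 0 = 0 := by
  unfold pvMail0
  suffices h : ∀ (d : PySem.Dict String Int), d.getD u 0 = 0 →
      (id_list.foldl (fun d u => d.insert u 0) d).getD u 0 = 0 by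
    exact h _ (PySem.Dict.getD_empty _ _)
  induction id_list with
  | nil => intro d hd; simpa using hd
  | cons x xs ih =>
    intro d hd
    rw [List.foldl_cons]
    apply ih
    rw [PySem.Dict.getD_insert]
    split <;> simp [hd]

lemma sum_map_ite {α : Type} (L : List α) (p : α → Bool) :
    (L.map (fun b => if p b then (1 : Int) else 0)).sum = (L.countP p : Int) := by
  induction L with
  | nil => simp
  | cons x xs ih =>
    rw [List.map_cons, List.sum_cons, ih, List.countP_cons]
    by_cases h : p x <;> simp [h]
    ring

lemma mailA_getD (L : List String) (RB : PySem.Dict String (PySem.Set String))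
    (d : PySem.Dict String Int) (u : String) :
    (L.foldl (fun d b => ((RB.getD b []).foldl (fun d r => d.modify r 0 (· + 1)) d)) d).getD u 0
      = d.getD u 0 + (L.map (fun b => ((RB.getD b []).count u : Int))).sum := by
  induction L generalizing d with
  | nil => simp
  | cons b bs ih =>
    rw [List.foldl_cons, ih, PySem.Dict.getD_foldl_modify_add_one]
    rw [List.map_cons, List.sum_cons]
    ring

-- A's mail count for u equals B's direct count over the deduped pairs
lemma mail_eq (id_list reports : List String) (k : Int)
    (wf : ∀ r ∈ reports, (PySem.Str.split₀ r).length = 2) (u : String) :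
    ((pvBannedA reports k).foldl (fun d b =>
        ((pvRB reports).getD b []).foldl (fun d r => d.modify r 0 (· + 1)) d) (pvMail0 id_list)).getD u 0
    = (((pvPairs reports).filter (fun p =>
        pfst p == u && decide (k ≤ pvNumReporters reports (psnd p)))).length : Int) := by
  have hndP : (pvPairs reports).Nodup := PySem.Set.nodup_ofList _
  -- A side: a sum of indicators over the banned list
  rw [mailA_getD, getD_pvMail0]
  have hcount : ∀ b ∈ pvBannedA reports k, (((pvRB reports).getD b []).count u : Int)
      = if decide (u ∈ (pvRB reports).getD b []) then (1 : Int) else 0 := by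
    intro b _
    have hnd : ((pvRB reports).getD b []).Nodup := by
      apply nodup_getD_foldA
      intro w; simp [PySem.Dict.getD_empty]
    by_cases h : u ∈ (pvRB reports).getD b []
    · simp [h, List.count_eq_one_of_mem hnd h]
    · simp [h, List.count_eq_zero.mpr h]
  rw [List.map_congr_left hcount, sum_map_ite, zero_add, List.countP_eq_length_filter]
  -- both sides are lengths of duplicate-free lists with the same members
  have hnd1 : ((pvBannedA reports k).filter
      (fun b => decide (u ∈ (pvRB reports).getD b []))).Nodup :=
    (PySem.Set.nodup_ofList _).filter _
  have hnd2 : (((pvPairs reports).filter (fun p =>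
      pfst p == u && decide (k ≤ pvNumReporters reports (psnd p)))).map psnd).Nodup := by
    apply List.Nodup.map_on _ (hndP.filter _)
    intro x hx y hy hxy
    have hx' := List.mem_filter.mp hx
    have hy' := List.mem_filter.mp hy
    have hx2 := hx'.2
    have hy2 := hy'.2
    rw [Bool.and_eq_true] at hx2 hy2
    have hux : pfst x = u := by simpa using hx2.1
    have huy : pfst y = u := by simpa using hy2.1
    rw [shape_pvPairs reports wf x hx'.1, shape_pvPairs reports wf y hy'.1, hxy, hux, huy]
  have hmem : ∀ b, b ∈ (pvBannedA reports k).filter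
      (fun b => decide (u ∈ (pvRB reports).getD b [])) ↔
      b ∈ ((pvPairs reports).filter (fun p =>
        pfst p == u && decide (k ≤ pvNumReporters reports (psnd p)))).map psnd := by
    intro b
    rw [List.mem_filter, List.mem_map]
    constructor
    · rintro ⟨hbA, hub⟩
      have hub' : [u, b] ∈ pvPairs reports := (mem_getD_pvRB reports u b).mp (by simpa using hub)
      have hk := ((mem_bannedA_iff reports k wf b).mp hbA).2
      refine ⟨[u, b], List.mem_filter.mpr ⟨hub', ?_⟩, psnd_pair u b⟩
      simp [pfst_pair, psnd_pair]
      exact hk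
    · rintro ⟨p, hp, rfl⟩
      have hp' := List.mem_filter.mp hp
      have hand := hp'.2
      rw [Bool.and_eq_true] at hand
      have hup : pfst p = u := by simpa using hand.1
      have hk : k ≤ pvNumReporters reports (psnd p) := by simpa using hand.2
      have hbA : psnd p ∈ pvBannedA reports k :=
        (mem_bannedA_iff reports k wf (psnd p)).mpr ⟨⟨p, hp'.1, rfl⟩, hk⟩
      refine ⟨hbA, ?_⟩
      have : [u, psnd p] ∈ pvPairs reports := by
        rw [← hup, ← shape_pvPairs reports wf p hp'.1]
        exact hp'.1
      simpa using (mem_getD_pvRB reports u (psnd p)).mpr this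
  have hperm := (List.perm_ext_iff_of_nodup hnd1 hnd2).mpr hmem
  rw [hperm.length_eq, List.length_map]

-- ===== VERDICT (by name: the statement is the Claim_ definition above) =====
theorem solution_spec : Claim_equal_solution := by
  intro id_list reports k _hdom hpre
  unfold Spec_solution
  rw [solution_eq, solution_alt_eq]
  exact List.map_congr_left (fun u _ => mail_eq id_list reports k hpre.1 u)
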